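-- pv_equiv track=rewrite | github.com/AdamZhouSE/pythonHomework | Code/CodeRecords/2489/60866/277423.py | shuzu
-- ===== SOURCE A (Python) =====
-- def shuzu(a,lower,upper):
--     sums=[]
--     for i in range(1,len(a)+1):
--         nums=0
--         for j in range(0,i):
--             nums=a[j]+nums
--         sums.append(nums)
--     res=0
--     for i in range(0,len(sums)):
--         for j in range(i,len(sums)):
--             if sums[j]>=sums[i]+lower  and sums[j]<=sums[i]+upper:
--                 res=res+1
--     return res
-- ===== SOURCE B (Python) =====
-- def _bisect_left(xs, v):
--     lo, hi = 0, len(xs)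
--     while lo < hi:
--         mid = (lo + hi) // 2
--         if xs[mid] < v:
--             lo = mid + 1
--         else:
--             hi = mid
--     return lo
--
--
-- def _bisect_right(xs, v):
--     lo, hi = 0, len(xs)
--     while lo < hi:
--         mid = (lo + hi) // 2
--         if xs[mid] <= v:
--             lo = mid + 1
--         else:
--             hi = mid
--     return lo
--
--
-- def shuzu(a, lower, upper):
--     # Count pairs i <= j with prefix[j] - prefix[i] in [lower, upper],
--     # keeping a sorted list of the prefix sums seen so far and counting
--     # each new prefix's partners by binary search.
--     if lower > upper:
--         return 0
--     res = 0
--     s = 0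
--     seen = []
--     for x in a:
--         s += x
--         seen.insert(_bisect_right(seen, s), s)
--         res += _bisect_right(seen, s - lower) - _bisect_left(seen, s - upper)
--     return res
-- ===== Notes on version B (the rewrite author's own statement) =====
-- stated objective: faster
-- what changed: A rebuilds every prefix sum with an inner loop and then scans all O(n^2) index pairs; B keeps one running prefix sum and a sorted list of the prefix sums seen so far, counting each new prefix's in-range partners by binary search (bisect insert + bisect_right/bisect_left difference), with an upfront 0 when lower > upper.
import Mathlib
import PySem

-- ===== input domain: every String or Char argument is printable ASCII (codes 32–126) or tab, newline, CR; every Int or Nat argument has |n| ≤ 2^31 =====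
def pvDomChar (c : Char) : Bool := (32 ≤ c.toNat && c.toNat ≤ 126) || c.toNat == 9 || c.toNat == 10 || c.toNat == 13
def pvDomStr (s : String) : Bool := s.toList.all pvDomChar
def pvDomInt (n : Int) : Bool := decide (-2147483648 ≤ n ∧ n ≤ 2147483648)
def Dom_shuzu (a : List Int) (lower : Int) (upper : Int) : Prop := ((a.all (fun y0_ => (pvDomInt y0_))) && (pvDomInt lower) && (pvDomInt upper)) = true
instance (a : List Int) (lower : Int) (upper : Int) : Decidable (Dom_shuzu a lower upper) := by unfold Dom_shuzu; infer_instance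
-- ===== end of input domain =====

-- B replaces A's quadratic prefix-sum rebuild and quadratic pair scan by one running
-- prefix sum plus a sorted list maintained and queried by binary search (objective: faster).

-- ===== PORT A =====
def shuzu (a : List Int) (lower : Int) (upper : Int) : Int :=
  let sums := (PySem.List.pyRange 1 ((a.length : Int) + 1)).foldl
    (fun sums i =>
      let nums := (PySem.List.pyRange 0 i).foldl
        (fun nums j => PySem.List.pyGetD a j 0 + nums) 0
      sums ++ [nums]) ([] : List Int)
  (PySem.List.pyRange 0 (sums.length : Int)).foldl
    (fun res i =>
      (PySem.List.pyRange i (sums.length : Int)).foldl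
        (fun res j =>
          if PySem.List.pyGetD sums j 0 ≥ PySem.List.pyGetD sums i 0 + lower ∧
             PySem.List.pyGetD sums j 0 ≤ PySem.List.pyGetD sums i 0 + upper
          then res + 1 else res) res) (0 : Int)

-- ===== PORT B =====
-- _bisect_left from Source B: the while-loop ported as recursion on hi - lo (mid inlined)
def bisectLeftGo (xs : List Int) (v : Int) (lo hi : Nat) : Nat :=
  if lo < hi then
    if PySem.List.pyGetD xs (((lo + hi) / 2 : Nat) : Int) 0 < v then
      bisectLeftGo xs v ((lo + hi) / 2 + 1) hi
    else
      bisectLeftGo xs v lo ((lo + hi) / 2)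
  else lo
termination_by hi - lo
decreasing_by all_goals omega

def bisectLeftB (xs : List Int) (v : Int) : Nat := bisectLeftGo xs v 0 xs.length

-- _bisect_right from Source B
def bisectRightGo (xs : List Int) (v : Int) (lo hi : Nat) : Nat :=
  if lo < hi then
    if PySem.List.pyGetD xs (((lo + hi) / 2 : Nat) : Int) 0 ≤ v then
      bisectRightGo xs v ((lo + hi) / 2 + 1) hi
    else
      bisectRightGo xs v lo ((lo + hi) / 2)
  else lo
termination_by hi - lo
decreasing_by all_goals omega

def bisectRightB (xs : List Int) (v : Int) : Nat := bisectRightGo xs v 0 xs.length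

def shuzu_alt (a : List Int) (lower : Int) (upper : Int) : Int :=
  if lower > upper then 0
  else
    (a.foldl (fun (st : Int × Int × List Int) x =>
      let s := st.2.1 + x
      let seen := PySem.List.insert st.2.2 ((bisectRightB st.2.2 s : Nat) : Int) s
      let res := st.1 + ((bisectRightB seen (s - lower) : Int) - (bisectLeftB seen (s - upper) : Int))
      (res, s, seen)) ((0 : Int), (0 : Int), ([] : List Int))).1

-- ===== PRECONDITION & SPEC =====
def Spec_shuzu (a : List Int) (lower : Int) (upper : Int) (out : Int) : Prop := out = shuzu_alt a lower upper
instance (a : List Int) (lower : Int) (upper : Int) (out : Int) : Decidable (Spec_shuzu a lower upper out) := by unfold Spec_shuzu; infer_instance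

-- ===== CLAIM (what is proved, stated in full; the proofs are below) =====
def Claim_equal_shuzu : Prop := ∀ (a : List Int) (lower : Int) (upper : Int), Dom_shuzu a lower upper → Spec_shuzu a lower upper (shuzu a lower upper)

-- ===== LEMMAS AND PROOFS =====

-- proof-side spec: list of running prefix sums of a starting from s
def pref : List Int → Int → List Int
  | [], _ => []
  | x :: t, s => (s + x) :: pref t (s + x)

-- proof-side spec: A's pair count, head-first (each head paired with itself and its tail)
def cntA (l u : Int) : List Int → Nat
  | [] => 0
  | x :: t => (x :: t).countP (fun y => decide (x + l ≤ y ∧ y ≤ x + u)) + cntA l u t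

lemma pref_eq (a : List Int) : ∀ s : Int,
    pref a s = (List.range a.length).map (fun k => s + (a.take (k + 1)).sum) := by
  induction a with
  | nil => intro s; simp [pref]
  | cons x t ih =>
    intro s
    simp only [pref, List.length_cons, List.range_succ_eq_map, List.map_cons, List.map_map]
    refine List.cons_eq_cons.mpr ⟨by simp, ?_⟩
    rw [ih (s + x)]
    apply List.map_congr_left
    intro k _
    simp only [Function.comp_apply, Nat.succ_eq_add_one, List.take_succ_cons, List.sum_cons]
    ring

lemma foldl_ite_count (p : Int → Prop) [DecidablePred p] (L : List Int) (r : Int) :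
    L.foldl (fun r y => if p y then r + 1 else r) r = r + (L.countP (fun y => decide (p y)) : Int) := by
  induction L generalizing r with
  | nil => simp
  | cons y t ih =>
    by_cases h : p y <;> simp [List.countP_cons, h, ih] <;> ring

-- count of p-elements when p holds exactly below the cut k
lemma countP_eq_of_cut (p : Int → Bool) (xs : List Int) (k : Nat) (hk : k ≤ xs.length)
    (h1 : ∀ j (hj : j < xs.length), j < k → p xs[j])
    (h2 : ∀ j (hj : j < xs.length), k ≤ j → ¬ p xs[j]) :
    xs.countP p = k := by
  conv_lhs => rw [← List.take_append_drop k xs]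
  rw [List.countP_append]
  have ht : (xs.take k).countP p = (xs.take k).length := by
    rw [List.countP_eq_length]
    intro y hy
    rw [List.mem_take_iff_getElem] at hy
    obtain ⟨j, hm, rfl⟩ := hy
    exact h1 j (by omega) (by omega)
  have hd : (xs.drop k).countP p = 0 := by
    rw [List.countP_eq_zero]
    intro y hy
    obtain ⟨j, hj, rfl⟩ := List.mem_iff_getElem.mp hy
    rw [List.getElem_drop]
    exact h2 (k + j) (by simp at hj; omega) (by omega)
  rw [ht, hd, List.length_take]
  omega

lemma pairwise_le_getElem (xs : List Int) (hs : xs.Pairwise (· ≤ ·))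
    (i j : Nat) (hj : j < xs.length) (hij : i ≤ j) : xs[i]'(by omega) ≤ xs[j] := by
  rcases Nat.lt_or_ge i j with h | h
  · exact List.pairwise_iff_getElem.mp hs i j (by omega) hj h
  · have : i = j := by omega
    subst this; exact le_refl _

lemma bisectRightGo_spec (xs : List Int) (v : Int) (hs : xs.Pairwise (· ≤ ·)) :
    ∀ n lo hi, hi - lo = n → lo ≤ hi → hi ≤ xs.length →
    (∀ j (hj : j < xs.length), j < lo → xs[j] ≤ v) →
    (∀ j (hj : j < xs.length), hi ≤ j → v < xs[j]) →
    bisectRightGo xs v lo hi ≤ xs.length ∧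
    (∀ j (hj : j < xs.length), j < bisectRightGo xs v lo hi → xs[j] ≤ v) ∧
    (∀ j (hj : j < xs.length), bisectRightGo xs v lo hi ≤ j → v < xs[j]) := by
  intro n
  induction n using Nat.strong_induction_on with
  | _ n IH =>
    intro lo hi hn hlohi hhi hlow hhigh
    rw [bisectRightGo]
    by_cases hlt : lo < hi
    · simp only [hlt, if_true]
      have hmid : (lo + hi) / 2 < xs.length := by omega
      rw [PySem.List.pyGetD_natCast, List.getD_eq_getElem _ _ hmid]
      by_cases hv : xs[(lo + hi) / 2] ≤ v
      · simp only [hv, if_true]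
        refine IH (hi - ((lo + hi) / 2 + 1)) (by omega) _ _ rfl (by omega) hhi ?_ hhigh
        intro j hj hjlt
        rcases Nat.lt_or_ge j lo with h | h
        · exact hlow j hj h
        · exact le_trans (pairwise_le_getElem xs hs j ((lo + hi) / 2) hmid (by omega)) hv
      · simp only [hv, if_false]
        push_neg at hv
        refine IH ((lo + hi) / 2 - lo) (by omega) _ _ rfl (by omega) (by omega) hlow ?_
        intro j hj hjge
        exact lt_of_lt_of_le hv (pairwise_le_getElem xs hs ((lo + hi) / 2) j hj hjge)
    · simp only [hlt, if_false]
      have : lo = hi := by omega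
      subst this
      exact ⟨by omega, fun j hj h => hlow j hj h, fun j hj h => hhigh j hj h⟩

lemma bisectLeftGo_spec (xs : List Int) (v : Int) (hs : xs.Pairwise (· ≤ ·)) :
    ∀ n lo hi, hi - lo = n → lo ≤ hi → hi ≤ xs.length →
    (∀ j (hj : j < xs.length), j < lo → xs[j] < v) →
    (∀ j (hj : j < xs.length), hi ≤ j → v ≤ xs[j]) →
    bisectLeftGo xs v lo hi ≤ xs.length ∧
    (∀ j (hj : j < xs.length), j < bisectLeftGo xs v lo hi → xs[j] < v) ∧
    (∀ j (hj : j < xs.length), bisectLeftGo xs v lo hi ≤ j → v ≤ xs[j]) := by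
  intro n
  induction n using Nat.strong_induction_on with
  | _ n IH =>
    intro lo hi hn hlohi hhi hlow hhigh
    rw [bisectLeftGo]
    by_cases hlt : lo < hi
    · simp only [hlt, if_true]
      have hmid : (lo + hi) / 2 < xs.length := by omega
      rw [PySem.List.pyGetD_natCast, List.getD_eq_getElem _ _ hmid]
      by_cases hv : xs[(lo + hi) / 2] < v
      · simp only [hv, if_true]
        refine IH (hi - ((lo + hi) / 2 + 1)) (by omega) _ _ rfl (by omega) hhi ?_ hhigh
        intro j hj hjlt
        rcases Nat.lt_or_ge j lo with h | h
        · exact hlow j hj h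
        · exact lt_of_le_of_lt (pairwise_le_getElem xs hs j ((lo + hi) / 2) hmid (by omega)) hv
      · simp only [hv, if_false]
        push_neg at hv
        refine IH ((lo + hi) / 2 - lo) (by omega) _ _ rfl (by omega) (by omega) hlow ?_
        intro j hj hjge
        exact le_trans hv (pairwise_le_getElem xs hs ((lo + hi) / 2) j hj hjge)
    · simp only [hlt, if_false]
      have : lo = hi := by omega
      subst this
      exact ⟨by omega, fun j hj h => hlow j hj h, fun j hj h => hhigh j hj h⟩

lemma bisectRightB_spec (xs : List Int) (v : Int) (hs : xs.Pairwise (· ≤ ·)) :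
    bisectRightB xs v ≤ xs.length ∧
    (∀ j (hj : j < xs.length), j < bisectRightB xs v → xs[j] ≤ v) ∧
    (∀ j (hj : j < xs.length), bisectRightB xs v ≤ j → v < xs[j]) := by
  exact bisectRightGo_spec xs v hs xs.length 0 xs.length (by omega) (by omega) le_rfl
    (fun j hj h => absurd h (by omega)) (fun j hj h => absurd hj (by omega))

lemma bisectLeftB_spec (xs : List Int) (v : Int) (hs : xs.Pairwise (· ≤ ·)) :
    bisectLeftB xs v ≤ xs.length ∧
    (∀ j (hj : j < xs.length), j < bisectLeftB xs v → xs[j] < v) ∧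
    (∀ j (hj : j < xs.length), bisectLeftB xs v ≤ j → v ≤ xs[j]) := by
  exact bisectLeftGo_spec xs v hs xs.length 0 xs.length (by omega) (by omega) le_rfl
    (fun j hj h => absurd h (by omega)) (fun j hj h => absurd hj (by omega))

lemma bisectRightB_count (xs : List Int) (v : Int) (hs : xs.Pairwise (· ≤ ·)) :
    xs.countP (fun x => decide (x ≤ v)) = bisectRightB xs v := by
  obtain ⟨h0, h1, h2⟩ := bisectRightB_spec xs v hs
  refine countP_eq_of_cut _ xs _ h0 ?_ ?_
  · intro j hj hlt; simpa using h1 j hj hlt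
  · intro j hj hge; simpa using h2 j hj hge

lemma bisectLeftB_count (xs : List Int) (v : Int) (hs : xs.Pairwise (· ≤ ·)) :
    xs.countP (fun x => decide (x < v)) = bisectLeftB xs v := by
  obtain ⟨h0, h1, h2⟩ := bisectLeftB_spec xs v hs
  refine countP_eq_of_cut _ xs _ h0 ?_ ?_
  · intro j hj hlt; simpa using h1 j hj hlt
  · intro j hj hge; simpa using h2 j hj hge

lemma insert_eq_take_drop (xs : List Int) (z : Int) (hs : xs.Pairwise (· ≤ ·)) :
    PySem.List.insert xs ((bisectRightB xs z : Nat) : Int) z =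
      xs.take (bisectRightB xs z) ++ z :: xs.drop (bisectRightB xs z) := by
  exact PySem.List.insert_natCast xs (bisectRightB xs z) z (bisectRightB_spec xs z hs).1

lemma insert_perm (xs : List Int) (z : Int) (hs : xs.Pairwise (· ≤ ·)) :
    (PySem.List.insert xs ((bisectRightB xs z : Nat) : Int) z).Perm (z :: xs) := by
  rw [insert_eq_take_drop xs z hs]
  exact List.perm_middle.trans (by rw [List.take_append_drop])

lemma insert_sorted (xs : List Int) (z : Int) (hs : xs.Pairwise (· ≤ ·)) :
    (PySem.List.insert xs ((bisectRightB xs z : Nat) : Int) z).Pairwise (· ≤ ·) := by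
  obtain ⟨h0, h1, h2⟩ := bisectRightB_spec xs z hs
  rw [insert_eq_take_drop xs z hs]
  rw [List.pairwise_append]
  refine ⟨hs.sublist (List.take_sublist _ _), ?_, ?_⟩
  · rw [List.pairwise_cons]
    refine ⟨?_, hs.sublist (List.drop_sublist _ _)⟩
    intro y hy
    obtain ⟨j, hj, rfl⟩ := List.mem_iff_getElem.mp hy
    rw [List.getElem_drop]
    exact le_of_lt (h2 _ (by simp at hj; omega) (by omega))
  · intro x hx b hb
    rw [List.mem_take_iff_getElem] at hx
    obtain ⟨j, hm, rfl⟩ := hx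
    have hxz : xs[j]'(by omega) ≤ z := h1 j (by omega) (by omega)
    rcases List.mem_cons.mp hb with rfl | hb
    · exact hxz
    · obtain ⟨j', hj', rfl⟩ := List.mem_iff_getElem.mp hb
      rw [List.getElem_drop]
      exact le_trans hxz (le_of_lt (h2 _ (by simp at hj'; omega) (by omega)))

lemma countP_split (L : List Int) (uu vv : Int) (h : uu ≤ vv) :
    L.countP (fun x => decide (x ≤ vv)) =
    L.countP (fun x => decide (x < uu)) + L.countP (fun x => decide (uu ≤ x ∧ x ≤ vv)) := by
  induction L with
  | nil => simp
  | cons y t ih =>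
    by_cases hy : y < uu
    · have h1 : y ≤ vv := by omega
      have h3 : ¬ (uu ≤ y ∧ y ≤ vv) := by omega
      simp [List.countP_cons, ih, hy, h1, h3] <;> omega
    · by_cases hv : y ≤ vv
      · have h3 : uu ≤ y ∧ y ≤ vv := ⟨by omega, hv⟩
        simp [List.countP_cons, ih, hy, hv, h3] <;> omega
      · have h3 : ¬ (uu ≤ y ∧ y ≤ vv) := by omega
        simp [List.countP_cons, ih, hy, hv, h3] <;> omega

lemma cntA_append_singleton (l u : Int) (z : Int) : ∀ c : List Int,
    cntA l u (c ++ [z]) = cntA l u c +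
      (c ++ [z]).countP (fun x => decide (x + l ≤ z ∧ z ≤ x + u)) := by
  intro c
  induction c with
  | nil => simp [cntA, List.countP_cons]
  | cons x c ih =>
    simp only [List.cons_append, cntA, ih, List.countP_append, List.countP_cons,
      List.countP_nil]
    omega

lemma cntA_zero_of_gt (l u : Int) (h : u < l) : ∀ L : List Int, cntA l u L = 0 := by
  intro L
  induction L with
  | nil => rfl
  | cons x t ih =>
    simp only [cntA, ih, Nat.add_zero]
    rw [List.countP_eq_zero]
    intro y _
    simp only [decide_eq_true_eq]
    omega

-- ===== A-side characterisation =====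

lemma sumLoopA (a : List Int) : ∀ (i : Nat), i ≤ a.length → ∀ c : Int,
    (List.range i).foldl (fun nums k => a.getD k 0 + nums) c = c + (a.take i).sum := by
  intro i
  induction i with
  | zero => intro _ c; simp
  | succ i ih =>
    intro hi c
    rw [List.range_succ, List.foldl_append, ih (by omega) c]
    have h : i < a.length := by omega
    simp only [List.foldl_cons, List.foldl_nil, List.take_succ, List.sum_append,
      List.getElem?_eq_getElem h, List.getD_eq_getElem _ _ h]
    simp
    ring

lemma sums_eq_pref (a : List Int) :
    ((PySem.List.pyRange 1 ((a.length : Int) + 1)).foldl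
      (fun sums i =>
        sums ++ [(PySem.List.pyRange 0 i).foldl
          (fun nums j => PySem.List.pyGetD a j 0 + nums) 0]) ([] : List Int)) = pref a 0 := by
  rw [PySem.List.pyRange_one]
  have hlen : ((a.length : Int) + 1 - 1).toNat = a.length := by omega
  rw [hlen, List.foldl_map]
  rw [PySem.List.foldl_congr_mem _ _
    (fun sums (k : Nat) => sums ++ [(a.take (k + 1)).sum]) _ ?_]
  · rw [PySem.List.foldl_append_singleton_eq_map, pref_eq a 0]
    simp
  · intro acc k hk
    rw [List.mem_range] at hk
    congr 1
    rw [PySem.List.pyRange_one]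
    have h2 : ((1 : Int) + (k : Int) - 0).toNat = k + 1 := by omega
    rw [h2, List.foldl_map]
    have h3 : ∀ (nums : Int) (m : Nat), m ∈ List.range (k + 1) →
        PySem.List.pyGetD a ((0 : Int) + (m : Int)) 0 + nums = a.getD m 0 + nums := by
      intro nums m _
      rw [zero_add, PySem.List.pyGetD_natCast]
    rw [PySem.List.foldl_congr_mem _ _ (fun nums (m : Nat) => a.getD m 0 + nums) _ h3]
    rw [sumLoopA a (k + 1) (by omega) 0, zero_add]

lemma count_fold_eq_cntA (l u : Int) : ∀ (sums : List Int) (r : Int),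
    (List.range sums.length).foldl
      (fun r k => r + ((sums.drop k).countP
        (fun y => decide (sums.getD k 0 + l ≤ y ∧ y ≤ sums.getD k 0 + u)) : Int)) r
    = r + (cntA l u sums : Int) := by
  intro sums
  induction sums with
  | nil => intro r; simp [cntA]
  | cons x t ih =>
    intro r
    simp only [List.length_cons, List.range_succ_eq_map, List.foldl_cons, List.foldl_map,
      Nat.succ_eq_add_one, List.getD_cons_succ, List.drop_succ_cons, List.drop_zero,
      List.getD_cons_zero]
    rw [ih]
    simp only [cntA]
    push_cast
    ring

lemma count_loops (l u : Int) (S : List Int) :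
    (PySem.List.pyRange 0 ((S.length : Nat) : Int)).foldl
      (fun res i =>
        (PySem.List.pyRange i ((S.length : Nat) : Int)).foldl
          (fun res j =>
            if PySem.List.pyGetD S j 0 ≥ PySem.List.pyGetD S i 0 + l ∧
               PySem.List.pyGetD S j 0 ≤ PySem.List.pyGetD S i 0 + u
            then res + 1 else res) res) (0 : Int) = (cntA l u S : Int) := by
  rw [PySem.List.pyRange_one]
  have hlen : (((S.length : Nat) : Int) - 0).toNat = S.length := by omega
  rw [hlen, List.foldl_map]
  have hbody : ∀ (res : Int) (k : Nat), k ∈ List.range S.length →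
      (PySem.List.pyRange ((0 : Int) + (k : Int)) ((S.length : Nat) : Int)).foldl
        (fun res j =>
          if PySem.List.pyGetD S j 0 ≥ PySem.List.pyGetD S ((0 : Int) + (k : Int)) 0 + l ∧
             PySem.List.pyGetD S j 0 ≤ PySem.List.pyGetD S ((0 : Int) + (k : Int)) 0 + u
          then res + 1 else res) res
      = res + ((S.drop k).countP
          (fun y => decide (S.getD k 0 + l ≤ y ∧ y ≤ S.getD k 0 + u)) : Int) := by
    intro res k _
    rw [show ((0 : Int) + (k : Int)) = (k : Int) by ring]
    rw [PySem.List.pyGetD_natCast]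
    rw [PySem.List.foldl_pyRange_pyGetD' S 0
      (fun res y => if y ≥ S.getD k 0 + l ∧ y ≤ S.getD k 0 + u then res + 1 else res) res
      (by omega)]
    rw [Int.toNat_natCast]
    rw [foldl_ite_count (fun y => y ≥ S.getD k 0 + l ∧ y ≤ S.getD k 0 + u)]
  rw [PySem.List.foldl_congr_mem _ _
    (fun res (k : Nat) => res + ((S.drop k).countP
      (fun y => decide (S.getD k 0 + l ≤ y ∧ y ≤ S.getD k 0 + u)) : Int)) _ hbody]
  rw [count_fold_eq_cntA l u S 0, zero_add]

lemma shuzu_eq_cntA (a : List Int) (l u : Int) :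
    shuzu a l u = (cntA l u (pref a 0) : Int) := by
  simp only [shuzu]
  rw [sums_eq_pref]
  exact count_loops l u (pref a 0)

-- ===== B-side characterisation =====

lemma alt_loop (l u : Int) (hlu : l ≤ u) : ∀ (a c seen : List Int) (res s : Int),
    seen.Perm c → seen.Pairwise (· ≤ ·) →
    (a.foldl (fun (st : Int × Int × List Int) x =>
      let s := st.2.1 + x
      let seen := PySem.List.insert st.2.2 ((bisectRightB st.2.2 s : Nat) : Int) s
      let res := st.1 + ((bisectRightB seen (s - l) : Int) - (bisectLeftB seen (s - u) : Int))
      (res, s, seen)) (res, s, seen)).1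
    = res + (cntA l u (c ++ pref a s) : Int) - (cntA l u c : Int) := by
  intro a
  induction a with
  | nil =>
    intro c seen res s _ _
    simp [pref]
  | cons x t ih =>
    intro c seen res s hperm hsorted
    simp only [List.foldl_cons]
    have hsorted' := insert_sorted seen (s + x) hsorted
    have hperm' : (PySem.List.insert seen ((bisectRightB seen (s + x) : Nat) : Int) (s + x)).Perm
        (c ++ [s + x]) :=
      (insert_perm seen (s + x) hsorted).trans
        ((hperm.cons (s + x)).trans (List.perm_append_singleton (s + x) c).symm)
    rw [ih (c ++ [s + x]) _ _ (s + x) hperm' hsorted']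
    have hcount : (bisectRightB (PySem.List.insert seen ((bisectRightB seen (s + x) : Nat) : Int) (s + x)) (s + x - l) : Int)
        - (bisectLeftB (PySem.List.insert seen ((bisectRightB seen (s + x) : Nat) : Int) (s + x)) (s + x - u) : Int)
        = ((c ++ [s + x]).countP (fun y => decide (y + l ≤ s + x ∧ s + x ≤ y + u)) : Int) := by
      rw [← bisectRightB_count _ _ hsorted', ← bisectLeftB_count _ _ hsorted']
      rw [hperm'.countP_eq, hperm'.countP_eq]
      rw [countP_split (c ++ [s + x]) (s + x - u) (s + x - l) (by omega)]
      have hcong : (c ++ [s + x]).countP (fun y => decide (s + x - u ≤ y ∧ y ≤ s + x - l))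
          = (c ++ [s + x]).countP (fun y => decide (y + l ≤ s + x ∧ s + x ≤ y + u)) := by
        apply List.countP_congr
        intro y _
        simp only [decide_eq_true_eq]
        omega
      rw [hcong]
      push_cast
      ring
    rw [hcount]
    have happ := cntA_append_singleton l u (s + x) c
    have hpref : pref (x :: t) s = (s + x) :: pref t (s + x) := rfl
    rw [hpref, ← List.append_cons c (s + x) (pref t (s + x))]
    push_cast [happ]
    ring

lemma shuzu_alt_eq_cntA (a : List Int) (l u : Int) :
    shuzu_alt a l u = (cntA l u (pref a 0) : Int) := by
  by_cases h : l > u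
  · simp only [shuzu_alt, h, if_true]
    rw [cntA_zero_of_gt l u h (pref a 0)]
    simp
  · simp only [shuzu_alt, h, if_false]
    rw [alt_loop l u (by omega) a [] [] 0 0 (List.Perm.refl _) (List.Pairwise.nil)]
    simp [cntA]

-- ===== VERDICT (by name: the statement is the Claim_ definition above) =====
theorem shuzu_spec : Claim_equal_shuzu := by
  intro a l u _
  unfold Spec_shuzu
  rw [shuzu_eq_cntA, shuzu_alt_eq_cntA]
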